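-- pv_equiv track=rewrite | github.com/IAmLosingSanity/pyrofls | task1/1.py | longest_nondecreasing_subsequence
-- ===== SOURCE A (Python) =====
-- def longest_nondecreasing_subsequence(lst):
--     max_length = 0
--     max_sum = float('-inf')
--     max_sequence = []
--
--     for i in range(len(lst)):
--         for j in range(i, len(lst)):
--             if all(lst[k] <= lst[k+1] for k in range(i, j)):
--                 current_length = j - i + 1
--                 current_sum = sum(lst[i:j+1])
--                 if current_length > max_length or (current_length == max_length and current_sum > max_sum):
--                     max_length = current_length
--                     max_sum = current_sum
--                     max_sequence = lst[i:j+1]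
--     return max_sequence
-- ===== SOURCE B (Python) =====
-- def longest_nondecreasing_subsequence(lst):
--     # One linear pass: split lst into maximal nondecreasing runs, then keep the
--     # longest run, breaking length ties by larger sum (first such run wins).
--     runs = []
--     cur = []
--     for x in lst:
--         if cur and cur[-1] > x:
--             runs.append(cur)
--             cur = [x]
--         else:
--             cur.append(x)
--     if cur:
--         runs.append(cur)
--     best = []
--     best_sum = 0
--     for r in runs:
--         s = sum(r)
--         if len(r) > len(best) or (len(r) == len(best) and s > best_sum):
--             best, best_sum = r, s
--     return best
-- ===== Notes on version B (the rewrite author's own statement) =====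
-- stated objective: faster
-- what changed: Replaced the triple-nested scan over all (i,j) windows (re-checking monotonicity and re-summing each window) by a single linear pass that splits the list into maximal nondecreasing runs and keeps the longest run, breaking length ties by larger sum with first-run-wins.
import Mathlib
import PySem

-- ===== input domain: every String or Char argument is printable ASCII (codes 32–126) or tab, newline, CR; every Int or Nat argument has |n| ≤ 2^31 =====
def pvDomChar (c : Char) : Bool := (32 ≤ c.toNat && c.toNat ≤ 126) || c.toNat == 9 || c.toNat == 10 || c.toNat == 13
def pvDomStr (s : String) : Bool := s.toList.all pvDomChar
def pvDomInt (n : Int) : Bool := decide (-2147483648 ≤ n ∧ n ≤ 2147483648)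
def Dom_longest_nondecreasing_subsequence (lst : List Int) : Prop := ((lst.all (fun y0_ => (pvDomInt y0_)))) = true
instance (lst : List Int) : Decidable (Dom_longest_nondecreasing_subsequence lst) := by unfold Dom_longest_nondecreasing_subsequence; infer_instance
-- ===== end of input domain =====

-- B replaces A's triple-nested window scan by one linear pass over maximal nondecreasing runs
-- (longest run wins, length ties broken by larger sum, first such run kept): faster by a better algorithm.

-- ===== PORT A =====
-- `max_sum` starts as float('-inf') and is only ever compared with int sums, so it is ported as
-- Option Int with none = -inf; pvGtOpt is Python's `current_sum > max_sum` under that encoding.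
def pvGtOpt (cs : Int) (ms : Option Int) : Bool :=
  match ms with
  | none => true
  | some v => decide (v < cs)

def longest_nondecreasing_subsequence (lst : List Int) : List Int :=
  ((PySem.List.pyRange 0 (lst.length : Int) 1).foldl (fun s i =>
    (PySem.List.pyRange i (lst.length : Int) 1).foldl (fun s j =>
      -- all(lst[k] <= lst[k+1] for k in range(i, j)); k and k+1 are always in range here,
      -- so the 0-default indexed read is exact
      if (PySem.List.pyRange i j 1).all
           (fun k => decide (PySem.List.pyGetD lst k 0 ≤ PySem.List.pyGetD lst (k + 1) 0)) then
        let cl : Int := j - i + 1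
        let cs : Int := (PySem.List.slice lst (some i) (some (j + 1))).sum
        if cl > s.1 ∨ (cl = s.1 ∧ pvGtOpt cs s.2.1 = true) then
          (cl, some cs, PySem.List.slice lst (some i) (some (j + 1)))
        else s
      else s) s) (((0 : Int), (none : Option Int), ([] : List Int)))).2.2

-- ===== PORT B =====
-- one step of B's first loop: close the current run when it would stop being nondecreasing
def pvStepRun (st : List (List Int) × List Int) (x : Int) : List (List Int) × List Int :=
  match st.2.getLast? with
  | some l => if l > x then (st.1 ++ [st.2], [x]) else (st.1, st.2 ++ [x])
  | none => (st.1, st.2 ++ [x])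

-- the maximal nondecreasing runs of lst, in order
def pvRuns (lst : List Int) : List (List Int) :=
  let p := lst.foldl pvStepRun ([], [])
  if p.2.isEmpty then p.1 else p.1 ++ [p.2]

def longest_nondecreasing_subsequence_alt (lst : List Int) : List Int :=
  ((pvRuns lst).foldl (fun b r =>
      let s := r.sum
      if r.length > b.1.length ∨ (r.length = b.1.length ∧ s > b.2) then (r, s) else b)
    (([] : List Int), (0 : Int))).1

-- ===== PRECONDITION & SPEC =====
def Spec_longest_nondecreasing_subsequence (lst : List Int) (out : List Int) : Prop := out = longest_nondecreasing_subsequence_alt lst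
instance (lst : List Int) (out : List Int) : Decidable (Spec_longest_nondecreasing_subsequence lst out) := by unfold Spec_longest_nondecreasing_subsequence; infer_instance

-- ===== CLAIM (what is proved, stated in full; the proofs are below) =====
def Claim_equal_longest_nondecreasing_subsequence : Prop := ∀ (lst : List Int), Dom_longest_nondecreasing_subsequence lst → Spec_longest_nondecreasing_subsequence lst (longest_nondecreasing_subsequence lst)

-- ===== LEMMAS AND PROOFS =====

-- maximal nondecreasing prefix of a list
def runPre : List Int → List Int
  | [] => []
  | [x] => [x]
  | x :: y :: t => if x ≤ y then x :: runPre (y :: t) else [x]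

-- the maximal nondecreasing runs, by structural recursion from the right end
def runsR : List Int → List (List Int)
  | [] => []
  | x :: t =>
    match runsR t with
    | [] => [[x]]
    | [] :: rs => [x] :: [] :: rs        -- unreachable: runs are never empty
    | (y :: r) :: rs => if x ≤ y then (x :: y :: r) :: rs else [x] :: (y :: r) :: rs

-- the nonempty tails of a list, longest first (the lists A's outer loop starts from)
def tailsNE : List Int → List (List Int)
  | [] => []
  | x :: t => (x :: t) :: tailsNE t

-- "candidate c beats the current best b": longer, or same length with larger sum
def keyLt (b c : List Int) : Prop :=
  b.length < c.length ∨ (b.length = c.length ∧ b.sum < c.sum)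

-- one comparison step on bare sequences
def gStep (b c : List Int) : List Int :=
  if b.length < c.length ∨ (b.length = c.length ∧ b.sum < c.sum) then c else b

-- A's loop state as a function of the best sequence so far
def emb (b : List Int) : Int × Option Int × List Int :=
  ((b.length : Int), if b.isEmpty then none else some b.sum, b)

-- A's state update, with the candidate's slice abstracted to a bare sequence
def pvUpd (s : Int × Option Int × List Int) (c : List Int) : Int × Option Int × List Int :=
  if ((c.length : Int)) > s.1 ∨ (((c.length : Int)) = s.1 ∧ pvGtOpt c.sum s.2.1 = true) then
    (((c.length : Int)), some c.sum, c)
  else s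

theorem gStep_pos {b c : List Int} (h : keyLt b c) : gStep b c = c := by
  unfold gStep keyLt at *
  simp [h]
theorem gStep_neg {b c : List Int} (h : ¬ keyLt b c) : gStep b c = b := by
  unfold gStep keyLt at *
  simp [h]

theorem foldl_gStep_stat {b : List Int} {cs : List (List Int)}
    (h : ∀ x ∈ cs, ¬ keyLt b x) : List.foldl gStep b cs = b := by
  induction cs with
  | nil => rfl
  | cons x cs ih =>
    have hx := h x (by simp)
    simp only [List.foldl_cons, gStep_neg hx]
    exact ih (fun y hy => h y (by simp [hy]))

theorem foldl_gStep_mem (b : List Int) (cs : List (List Int)) :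
    List.foldl gStep b cs ∈ b :: cs := by
  induction cs generalizing b with
  | nil => simp
  | cons x cs ih =>
    simp only [List.foldl_cons]
    have h1 : List.foldl gStep (gStep b x) cs ∈ gStep b x :: cs := ih (gStep b x)
    have hgx : gStep b x = b ∨ gStep b x = x := by unfold gStep; split <;> simp
    rw [List.mem_cons] at h1
    simp only [List.mem_cons]
    rcases h1 with h1 | h1
    · rcases hgx with h2 | h2
      · left; rw [h1, h2]
      · right; left; rw [h1, h2]
    · tauto

theorem pvUpd_emb {b c : List Int} (hc : c ≠ []) : pvUpd (emb b) c = emb (gStep b c) := by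
  have hcl : 0 < c.length := List.length_pos_iff.mpr hc
  have hcond : (((c.length : Int)) > ((emb b).1) ∨
      (((c.length : Int)) = (emb b).1 ∧ pvGtOpt c.sum (emb b).2.1 = true)) ↔ keyLt b c := by
    rcases b with _ | ⟨y, ys⟩
    · simp [emb, pvGtOpt, keyLt]; omega
    · simp [emb, pvGtOpt, keyLt]; omega
  by_cases h : keyLt b c
  · rw [gStep_pos h]
    unfold pvUpd
    rw [if_pos (hcond.mpr h)]
    simp [emb, hc]
  · rw [gStep_neg h]
    unfold pvUpd
    rw [if_neg (fun hx => h (hcond.mp hx))]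

theorem foldl_pvUpd_emb {cs : List (List Int)} (h : ∀ x ∈ cs, x ≠ []) (b : List Int) :
    List.foldl pvUpd (emb b) cs = emb (List.foldl gStep b cs) := by
  induction cs generalizing b with
  | nil => rfl
  | cons x cs ih =>
    simp only [List.foldl_cons, pvUpd_emb (h x (by simp))]
    exact ih (fun y hy => h y (by simp [hy])) _

-- runPre of a cons starts with the head
theorem runPre_head : ∀ (x : Int) (t : List Int), ∃ s, runPre (x :: t) = x :: s := by
  intro x t
  rcases t with _ | ⟨y, t'⟩
  · exact ⟨[], rfl⟩
  · rw [runPre]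
    by_cases h : x ≤ y
    · exact ⟨_, by rw [if_pos h]⟩
    · exact ⟨[], by rw [if_neg h]⟩

-- runPre is a nonempty nondecreasing prefix, maximal at the break point
theorem runPre_decomp : ∀ (d : List Int), d ≠ [] →
    List.IsChain (· ≤ ·) (runPre d) ∧ runPre d ≠ [] ∧
    ∃ e, d = runPre d ++ e ∧ (e = [] ∨ ∃ (he : e ≠ []) (hr : runPre d ≠ []),
      e.head he < (runPre d).getLast hr) := by
  intro d
  induction d with
  | nil => intro h; exact absurd rfl h
  | cons x t ih =>
    intro _
    rcases t with _ | ⟨y, t'⟩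
    · exact ⟨by simp [runPre], by simp [runPre], [], by simp [runPre], Or.inl rfl⟩
    · by_cases hxy : x ≤ y
      · obtain ⟨hch, hne, e, hdec, hbd⟩ := ih (by simp)
        rw [runPre, if_pos hxy]
        obtain ⟨s0, hs0⟩ := runPre_head y t'
        refine ⟨?_, by simp, e, ?_, ?_⟩
        · rw [List.isChain_cons]
          refine ⟨?_, hch⟩
          intro z hz
          rw [hs0] at hz
          simp at hz
          omega
        · rw [List.cons_append, ← hdec]
        · rcases hbd with h | ⟨he, hr, hlt⟩
          · exact Or.inl h
          · refine Or.inr ⟨he, by simp, ?_⟩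
            rwa [List.getLast_cons hne]
      · rw [runPre, if_neg hxy]
        refine ⟨by simp, by simp, y :: t', by simp, Or.inr ⟨by simp, by simp, ?_⟩⟩
        simp
        omega

-- a nondecreasing list followed by a strictly smaller element is its own runPre
theorem runPre_whole : ∀ (r rest : List Int), List.IsChain (· ≤ ·) r → (hr : r ≠ []) →
    (rest = [] ∨ ∃ hx : rest ≠ [], rest.head hx < r.getLast hr) →
    runPre (r ++ rest) = r := by
  intro r
  induction r with
  | nil => intro rest _ hr; exact absurd rfl hr
  | cons x r' ih =>
    intro rest hch hr hbd
    rcases r' with _ | ⟨y, r''⟩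
    · rcases rest with _ | ⟨h, t⟩
      · rfl
      · rcases hbd with hbd | ⟨_, hlt⟩
        · exact absurd hbd (by simp)
        · have hx : h < x := by simpa using hlt
          simp only [List.singleton_append, runPre]
          rw [if_neg (by omega)]
    · have hxy : x ≤ y := by
        rw [List.isChain_cons] at hch
        simpa using hch.1
      have hch' : List.IsChain (· ≤ ·) (y :: r'') := (List.isChain_cons.mp hch).2
      have hbd' : rest = [] ∨ ∃ hx : rest ≠ [], rest.head hx < (y :: r'').getLast (by simp) := by
        rcases hbd with h | ⟨hx, hlt⟩
        · exact Or.inl h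
        · refine Or.inr ⟨hx, ?_⟩
          rwa [List.getLast_cons (by simp)] at hlt
      have hih : runPre (y :: (r'' ++ rest)) = y :: r'' := ih rest hch' (by simp) hbd'
      show runPre (x :: y :: (r'' ++ rest)) = x :: y :: r''
      rw [runPre, if_pos hxy, hih]

theorem runsR_head : ∀ (x : Int) (t : List Int), ∃ s rs, runsR (x :: t) = (x :: s) :: rs := by
  intro x t
  rcases h : runsR t with _ | ⟨_ | ⟨y, r⟩, rs⟩
  · exact ⟨[], [], by rw [runsR, h]⟩
  · exact ⟨[], [] :: rs, by rw [runsR, h]⟩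
  · by_cases hxy : x ≤ y
    · exact ⟨y :: r, rs, by rw [runsR, h]; simp [hxy]⟩
    · exact ⟨[], (y :: r) :: rs, by rw [runsR, h]; simp [hxy]⟩

theorem runsR_whole : ∀ (r : List Int), List.IsChain (· ≤ ·) r → r ≠ [] → runsR r = [r] := by
  intro r
  induction r with
  | nil => intro _ h; exact absurd rfl h
  | cons x t ih =>
    intro hch _
    rcases t with _ | ⟨y, t'⟩
    · rfl
    · have hxy : x ≤ y := by
        rw [List.isChain_cons] at hch
        simpa using hch.1
      have h1 : runsR (y :: t') = [y :: t'] := ih (List.isChain_cons.mp hch).2 (by simp)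
      rw [runsR, h1]
      simp [hxy]

theorem runsR_split : ∀ (r : List Int) (hr : r ≠ []) (x : Int) (xs : List Int),
    List.IsChain (· ≤ ·) r → r.getLast hr > x →
    runsR (r ++ x :: xs) = r :: runsR (x :: xs) := by
  intro r
  induction r with
  | nil => intro hr; exact absurd rfl hr
  | cons c t ih =>
    intro _ x xs hch hlast
    rcases t with _ | ⟨c2, t'⟩
    · obtain ⟨s, rs, hh⟩ := runsR_head x xs
      have hcx : ¬ c ≤ x := by simp at hlast; omega
      rw [List.singleton_append, runsR, hh]
      show (if c ≤ x then (c :: x :: s) :: rs else [c] :: (x :: s) :: rs) = [c] :: (x :: s) :: rs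
      rw [if_neg hcx]
    · have hc12 : c ≤ c2 := by
        rw [List.isChain_cons] at hch
        simpa using hch.1
      have hih : runsR ((c2 :: t') ++ x :: xs) = (c2 :: t') :: runsR (x :: xs) := by
        refine ih (by simp) x xs (List.isChain_cons.mp hch).2 ?_
        rwa [List.getLast_cons (by simp)] at hlast
      rw [show (c :: c2 :: t') ++ x :: xs = c :: ((c2 :: t') ++ x :: xs) from rfl,
        runsR, hih]
      show (if c ≤ c2 then (c :: c2 :: t') :: runsR (x :: xs)
          else [c] :: (c2 :: t') :: runsR (x :: xs)) = (c :: c2 :: t') :: runsR (x :: xs)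
      rw [if_pos hc12]

-- the first run of a nonempty list, with its properties
theorem runsR_decomp : ∀ (lst : List Int), lst ≠ [] →
    ∃ r rest, runsR lst = r :: runsR rest ∧ lst = r ++ rest ∧ ∃ hr : r ≠ [],
      List.IsChain (· ≤ ·) r ∧ (rest = [] ∨ ∃ hx : rest ≠ [], rest.head hx < r.getLast hr) := by
  intro lst
  induction lst with
  | nil => intro h; exact absurd rfl h
  | cons x t ih =>
    intro _
    rcases t with _ | ⟨y, t'⟩
    · exact ⟨[x], [], rfl, rfl, by simp, by simp, Or.inl rfl⟩
    · obtain ⟨r, rest, h1, h2, hr, hch, hbd⟩ := ih (by simp)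
      obtain ⟨r0, hr0⟩ : ∃ r0, r = y :: r0 := by
        rcases r with _ | ⟨z, r0⟩
        · exact absurd rfl hr
        · have : z = y := by
            have := congrArg (List.head?) h2
            simpa using this.symm
          exact ⟨r0, by rw [this]⟩
      subst hr0
      by_cases hxy : x ≤ y
      · refine ⟨x :: y :: r0, rest, ?_, ?_, by simp, ?_, ?_⟩
        · rw [runsR, h1]
          show (if x ≤ y then (x :: y :: r0) :: runsR rest
              else [x] :: (y :: r0) :: runsR rest) = (x :: y :: r0) :: runsR rest
          rw [if_pos hxy]
        · rw [List.cons_append, ← h2]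
        · rw [List.isChain_cons]
          exact ⟨by simp [hxy], hch⟩
        · rcases hbd with h | ⟨hx, hlt⟩
          · exact Or.inl h
          · exact Or.inr ⟨hx, by rwa [List.getLast_cons (by simp)]⟩
      · refine ⟨[x], y :: t', ?_, rfl, by simp, by simp, ?_⟩
        · rw [runsR, h1]
          show (if x ≤ y then (x :: y :: r0) :: runsR rest
              else [x] :: (y :: r0) :: runsR rest) = [x] :: ((y :: r0) :: runsR rest)
          rw [if_neg hxy]
        · refine Or.inr ⟨by simp, ?_⟩
          simp
          omega

-- membership-wise congruence for foldl
theorem foldl_congr_mem' {α β : Type} {f g : α → β → α} (L : List β)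
    (h : ∀ s x, x ∈ L → f s x = g s x) : ∀ s, List.foldl f s L = List.foldl g s L := by
  induction L with
  | nil => intro s; rfl
  | cons x L ih =>
    intro s
    simp only [List.foldl_cons, h s x (by simp)]
    exact ih (fun s y hy => h s y (by simp [hy])) _

theorem foldl_if_false {α : Type} {p : Nat → Prop} [DecidablePred p] {f : α → Nat → α} :
    ∀ (L : List Nat) (s : α), (∀ x ∈ L, ¬ p x) →
    List.foldl (fun s k => if p k then f s k else s) s L = s := by
  intro L
  induction L with
  | nil => intro s _; rfl
  | cons x L ih =>
    intro s h
    simp only [List.foldl_cons, if_neg (h x (by simp))]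
    exact ih _ (fun y hy => h y (by simp [hy]))

theorem foldl_if_true {α : Type} {p : Nat → Prop} [DecidablePred p] {f : α → Nat → α} :
    ∀ (L : List Nat) (s : α), (∀ x ∈ L, p x) →
    List.foldl (fun s k => if p k then f s k else s) s L = List.foldl f s L := by
  intro L
  induction L with
  | nil => intro s _; rfl
  | cons x L ih =>
    intro s h
    simp only [List.foldl_cons, if_pos (h x (by simp))]
    exact ih _ (fun y hy => h y (by simp [hy]))

-- the window-is-nondecreasing test characterised by the length of runPre
theorem chk_iff (d : List Int) (k : Nat) (hk : k < d.length) :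
    List.IsChain (· ≤ ·) (d.take (k + 1)) ↔ k < (runPre d).length := by
  have hd : d ≠ [] := by intro h; simp [h] at hk
  obtain ⟨hch, hne, e, hdec, hbd⟩ := runPre_decomp d hd
  have hlen : d.length = (runPre d).length + e.length := by
    conv_lhs => rw [hdec]
    simp
  constructor
  · intro h
    by_contra hcon
    push_neg at hcon
    have he : e ≠ [] := by
      intro h0
      rw [h0] at hlen
      simp at hlen
      omega
    obtain ⟨h0, t0, he0⟩ := List.exists_cons_of_ne_nil he
    subst he0
    have htk : d.take (k + 1) = runPre d ++ h0 :: (t0.take (k - (runPre d).length)) := by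
      conv_lhs => rw [hdec]
      rw [List.take_append, List.take_of_length_le (by omega)]
      congr 1
      have : k + 1 - (runPre d).length = (k - (runPre d).length) + 1 := by omega
      rw [this, List.take_succ_cons]
    rw [htk, List.isChain_append] at h
    obtain ⟨-, -, hb⟩ := h
    have hlast := hb ((runPre d).getLast hne) (List.getLast?_eq_some_getLast hne) h0 rfl
    rcases hbd with h1 | ⟨he1, hr1, hlt⟩
    · exact he h1
    · simp only [List.head_cons] at hlt
      have hlt2 : h0 < (runPre d).getLast hne := hlt
      omega
  · intro h
    have htk : d.take (k + 1) = (runPre d).take (k + 1) := by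
      conv_lhs => rw [hdec]
      rw [List.take_append_of_le_length (by omega)]
    rw [htk, List.isChain_iff_getElem]
    intro t ht
    rw [List.isChain_iff_getElem] at hch
    have hlt : t + 1 < (runPre d).length := by
      simp [List.length_take] at ht
      omega
    simp only [List.getElem_take]
    exact hch t hlt

-- A's `all` check over indices equals nondecreasingness of the window
theorem chk_port (lst : List Int) (i k : Nat) (h : i + k < lst.length) :
    ((PySem.List.pyRange (i : Int) ((i : Int) + (k : Int)) 1).all
        (fun q => decide (PySem.List.pyGetD lst q 0 ≤ PySem.List.pyGetD lst (q + 1) 0)) = true)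
      ↔ List.IsChain (· ≤ ·) ((lst.drop i).take (k + 1)) := by
  have hmid : (((PySem.List.pyRange (i : Int) ((i : Int) + (k : Int)) 1).all
      (fun q => decide (PySem.List.pyGetD lst q 0 ≤ PySem.List.pyGetD lst (q + 1) 0)) = true)
      ↔ ∀ t, t < k → lst.getD (i + t) 0 ≤ lst.getD (i + t + 1) 0) := by
    rw [List.all_eq_true]
    constructor
    · intro hall t ht
      have h1 := hall ((i : Int) + (t : Int))
        (PySem.List.mem_pyRange_one.mpr ⟨by omega, by omega⟩)
      simp only [decide_eq_true_eq] at h1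
      have e1 : ((i : Int)) + (t : Int) = ((i + t : Nat) : Int) := by omega
      have e2 : (((i + t : Nat) : Int)) + 1 = ((i + t + 1 : Nat) : Int) := by omega
      rw [e1, e2, PySem.List.pyGetD_natCast, PySem.List.pyGetD_natCast] at h1
      exact h1
    · intro hmid q hq
      obtain ⟨hq1, hq2⟩ := PySem.List.mem_pyRange_one.mp hq
      simp only [decide_eq_true_eq]
      have e1 : q = (((q - (i : Int)).toNat + i : Nat) : Int) := by omega
      have e2 : ((((q - (i : Int)).toNat + i : Nat) : Int)) + 1
          = (((q - (i : Int)).toNat + i + 1 : Nat) : Int) := by omega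
      rw [e1, e2, PySem.List.pyGetD_natCast, PySem.List.pyGetD_natCast]
      have e3 : (q - (i : Int)).toNat + i = i + (q - (i : Int)).toNat := by omega
      rw [e3]
      exact hmid ((q - (i : Int)).toNat) (by omega)
  rw [hmid, List.isChain_iff_getElem]
  have hseglen : (((lst.drop i).take (k + 1))).length = k + 1 := by
    simp [List.length_take, List.length_drop]
    omega
  constructor
  · intro hmid t ht
    rw [hseglen] at ht
    have hb1 : i + t < lst.length := by omega
    have hb2 : i + t + 1 < lst.length := by omega
    have := hmid t (by omega)
    rw [List.getD_eq_getElem lst 0 hb1, List.getD_eq_getElem lst 0 hb2] at this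
    simp only [List.getElem_take, List.getElem_drop]
    convert this using 2
  · intro hch t ht
    have hb1 : i + t < lst.length := by omega
    have hb2 : i + t + 1 < lst.length := by omega
    have := hch t (by rw [hseglen]; omega)
    simp only [List.getElem_take, List.getElem_drop] at this
    rw [List.getD_eq_getElem lst 0 hb1, List.getD_eq_getElem lst 0 hb2]
    convert this using 2

-- folding gStep over the increasing-length prefixes of the run reduces to one gStep on the run
theorem foldl_gStep_prefixes (d : List Int) (hd : d ≠ []) (b : List Int) :
    List.foldl gStep b ((List.range (runPre d).length).map (fun k => d.take (k + 1)))
      = gStep b (runPre d) := by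
  obtain ⟨hch, hne, e, hdec, hbd⟩ := runPre_decomp d hd
  have hdl : (runPre d).length + e.length = d.length := by
    have := congrArg List.length hdec
    simp at this
    omega
  obtain ⟨rl', hrl'⟩ : ∃ rl', (runPre d).length = rl' + 1 := by
    have : 0 < (runPre d).length := List.length_pos_iff.mpr hne
    exact ⟨(runPre d).length - 1, by omega⟩
  have hlast : d.take ((runPre d).length) = runPre d := by
    set rp := runPre d with hrp
    rw [hdec, List.take_append_of_le_length (le_refl _), List.take_length]
  have hcs : ∀ x ∈ (List.range rl').map (fun k => d.take (k + 1)),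
      x.length < (runPre d).length := by
    intro x hx
    obtain ⟨k, hk, rfl⟩ := List.mem_map.mp hx
    rw [List.mem_range] at hk
    rw [List.length_take]
    omega
  rw [hrl', List.range_succ, List.map_append, List.foldl_append]
  simp only [List.map_cons, List.map_nil, List.foldl_cons, List.foldl_nil]
  rw [show rl' + 1 = (runPre d).length from hrl'.symm, hlast]
  by_cases hstat : ∀ x ∈ (List.range rl').map (fun k => d.take (k + 1)), ¬ keyLt b x
  · rw [foldl_gStep_stat hstat]
  · push_neg at hstat
    obtain ⟨x, hx, hkx⟩ := hstat
    have hxl : x.length < (runPre d).length := hcs x hx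
    have hbl : b.length < (runPre d).length := by
      unfold keyLt at hkx
      omega
    have hb' : (List.foldl gStep b ((List.range rl').map (fun k => d.take (k + 1)))).length
        < (runPre d).length := by
      have hm := foldl_gStep_mem b ((List.range rl').map (fun k => d.take (k + 1)))
      rw [List.mem_cons] at hm
      rcases hm with hm | hm
      · rw [hm]; exact hbl
      · exact hcs _ hm
    rw [gStep_pos (Or.inl hb'), gStep_pos (Or.inl hbl)]

-- A's inner loop (start index i) performs exactly one gStep with runPre (lst.drop i)
theorem innerA_eq (lst : List Int) (i : Nat) (hi : i < lst.length) (b : List Int) :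
    (PySem.List.pyRange (i : Int) (lst.length : Int) 1).foldl (fun s j =>
      if (PySem.List.pyRange (i : Int) j 1).all
           (fun k => decide (PySem.List.pyGetD lst k 0 ≤ PySem.List.pyGetD lst (k + 1) 0)) then
        let cl : Int := j - (i : Int) + 1
        let cs : Int := (PySem.List.slice lst (some (i : Int)) (some (j + 1))).sum
        if cl > s.1 ∨ (cl = s.1 ∧ pvGtOpt cs s.2.1 = true) then
          (cl, some cs, PySem.List.slice lst (some (i : Int)) (some (j + 1)))
        else s
      else s) (emb b)
    = emb (gStep b (runPre (lst.drop i))) := by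
  have hd : lst.drop i ≠ [] := by
    intro h0
    have := congrArg List.length h0
    simp at this
    omega
  have hrl1 : (runPre (lst.drop i)).length + 1 ≤ (lst.drop i).length + 1 := by
    obtain ⟨-, -, e, hdec, -⟩ := runPre_decomp _ hd
    have := congrArg List.length hdec
    rw [List.length_append] at this
    omega
  have h1 : PySem.List.pyRange (i : Int) (lst.length : Int) 1
      = (List.range (lst.length - i)).map (fun (k : Nat) => ((i : Int)) + (k : Int)) := by
    have ht : ((lst.length : Int) - (i : Int)).toNat = lst.length - i := by omega
    rw [PySem.List.pyRange_one, ht]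
  rw [h1, List.foldl_map]
  refine Eq.trans (foldl_congr_mem' (g := fun s k =>
      if k < (runPre (lst.drop i)).length then pvUpd s ((lst.drop i).take (k + 1)) else s)
    (List.range (lst.length - i)) ?_ (emb b)) ?_
  · intro s k hk
    rw [List.mem_range] at hk
    have hik : i + k < lst.length := by omega
    have hcond := (chk_port lst i k hik).trans
      (chk_iff (lst.drop i) k (by rw [List.length_drop]; omega))
    have hslice : PySem.List.slice lst (some (i : Int)) (some (((i : Int) + (k : Int)) + 1))
        = (lst.drop i).take (k + 1) := by
      have e1 : ((i : Int) + (k : Int)) + 1 = (i : Int) + ((k + 1 : Nat) : Int) := by omega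
      rw [e1, PySem.List.slice_natCast_add]
    have hcl : ((i : Int) + (k : Int)) - (i : Int) + 1
        = ((((lst.drop i).take (k + 1)).length : Nat) : Int) := by
      rw [List.length_take, List.length_drop]
      omega
    by_cases hc : k < (runPre (lst.drop i)).length
    · rw [if_pos (hcond.mpr hc)]
      simp only [hslice, hcl, pvUpd, if_pos hc]
    · rw [if_neg (fun hx => hc (hcond.mp hx))]
      simp only [if_neg hc]
  have hnn : ∀ x ∈ (List.range (runPre (lst.drop i)).length).map
      (fun k => (lst.drop i).take (k + 1)), x ≠ [] := by
    intro x hx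
    obtain ⟨k, hk, rfl⟩ := List.mem_map.mp hx
    have : 0 < (lst.drop i).length := List.length_pos_iff.mpr hd
    intro h0
    have := congrArg List.length h0
    rw [List.length_take] at this
    simp at this
    omega
  rw [show lst.length - i = (lst.drop i).length from (List.length_drop ..).symm,
    show (lst.drop i).length
      = (runPre (lst.drop i)).length + ((lst.drop i).length - (runPre (lst.drop i)).length)
      from by omega,
    List.range_add, List.foldl_append,
    foldl_if_true (List.range (runPre (lst.drop i)).length) (emb b)
      (fun k hk => List.mem_range.mp hk),
    ← List.foldl_map (f := fun k => (lst.drop i).take (k + 1)) (g := pvUpd),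
    foldl_pvUpd_emb hnn b, foldl_gStep_prefixes (lst.drop i) hd b,
    foldl_if_false _ _ (by
      intro x hx
      obtain ⟨k, hk, rfl⟩ := List.mem_map.mp hx
      omega)]

theorem mapDrop_eq_tailsNE : ∀ (lst : List Int),
    (List.range lst.length).map (fun i => lst.drop i) = tailsNE lst := by
  intro lst
  induction lst with
  | nil => rfl
  | cons x t ih =>
    simp only [List.length_cons, List.range_succ_eq_map, List.map_cons, List.drop_zero,
      List.map_map, tailsNE]
    refine congrArg _ ?_
    rw [← ih]
    rfl

-- a candidate shorter than the run just folded in can never win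
theorem gStep_absorb {b r c : List Int} (hc : c.length < r.length) :
    gStep (gStep b r) c = gStep b r := by
  by_cases h : keyLt b r
  · rw [gStep_pos h, gStep_neg (by unfold keyLt; omega)]
  · rw [gStep_neg h]
    rw [gStep_neg]
    unfold keyLt at *
    omega

-- collapsing the tails of one run: only the full run matters
theorem foldl_runPre_tails : ∀ (r rest : List Int) (b : List Int)
    (hr : r ≠ []), List.IsChain (· ≤ ·) r →
    (rest = [] ∨ ∃ hx : rest ≠ [], rest.head hx < r.getLast hr) →
    List.foldl (fun b d => gStep b (runPre d)) b (tailsNE (r ++ rest))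
      = List.foldl (fun b d => gStep b (runPre d)) (gStep b r) (tailsNE rest) := by
  intro r
  induction r with
  | nil => intro rest b hr; exact absurd rfl hr
  | cons x r' ih =>
    intro rest b hrne hch hbd
    rcases r' with _ | ⟨y, r''⟩
    · show List.foldl _ b ((x :: rest) :: tailsNE rest) = _
      rw [List.foldl_cons,
        show runPre (x :: rest) = [x] from runPre_whole [x] rest hch (by simp) hbd]
    · have hch' : List.IsChain (· ≤ ·) (y :: r'') := (List.isChain_cons.mp hch).2
      have hbd' : rest = [] ∨ ∃ hx : rest ≠ [], rest.head hx < (y :: r'').getLast (by simp) := by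
        rcases hbd with h | ⟨hx, hlt⟩
        · exact Or.inl h
        · exact Or.inr ⟨hx, by rwa [List.getLast_cons (by simp)] at hlt⟩
      show List.foldl _ b ((x :: y :: r'' ++ rest) :: tailsNE (y :: r'' ++ rest)) = _
      rw [List.foldl_cons,
        show runPre (x :: y :: r'' ++ rest) = x :: y :: r'' from
          runPre_whole (x :: y :: r'') rest hch (by simp) hbd,
        show (y :: r'' ++ rest : List Int) = (y :: r'') ++ rest from rfl,
        ih rest (gStep b (x :: y :: r'')) (by simp) hch' hbd',
        gStep_absorb (by simp)]

theorem foldl_tails_eq_runs : ∀ (lst : List Int) (b : List Int),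
    List.foldl (fun b d => gStep b (runPre d)) b (tailsNE lst)
      = List.foldl gStep b (runsR lst) := by
  have key : ∀ (n : Nat) (lst : List Int), lst.length ≤ n → ∀ (b : List Int),
      List.foldl (fun b d => gStep b (runPre d)) b (tailsNE lst)
        = List.foldl gStep b (runsR lst) := by
    intro n
    induction n with
    | zero =>
      intro lst hl b
      have : lst = [] := List.eq_nil_of_length_eq_zero (by omega)
      subst this
      rfl
    | succ n ih =>
      intro lst hl b
      rcases he : lst with _ | ⟨x, t⟩
      · rfl
      · rw [← he]
        obtain ⟨r, rest, h1, h2, hr, hch, hbd⟩ := runsR_decomp lst (by rw [he]; simp)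
        have hrest : rest.length ≤ n := by
          have := congrArg List.length h2
          simp at this
          have hrl : 0 < r.length := List.length_pos_iff.mpr hr
          omega
        rw [h1]
        calc List.foldl (fun b d => gStep b (runPre d)) b (tailsNE lst)
            = List.foldl (fun b d => gStep b (runPre d)) b (tailsNE (r ++ rest)) := by rw [← h2]
          _ = List.foldl (fun b d => gStep b (runPre d)) (gStep b r) (tailsNE rest) :=
              foldl_runPre_tails r rest b hr hch hbd
          _ = List.foldl gStep (gStep b r) (runsR rest) := ih rest hrest _
          _ = List.foldl gStep b (r :: runsR rest) := by rw [List.foldl_cons]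
  intro lst b
  exact key lst.length lst (le_refl _) b

-- B's run-splitting pass computes runsR
theorem pvRuns_eq_runsR (lst : List Int) : pvRuns lst = runsR lst := by
  have aux : ∀ (xs cur : List Int) (acc : List (List Int)), cur ≠ [] →
      List.IsChain (· ≤ ·) cur →
      (if (List.foldl pvStepRun (acc, cur) xs).2.isEmpty
        then (List.foldl pvStepRun (acc, cur) xs).1
        else (List.foldl pvStepRun (acc, cur) xs).1 ++ [(List.foldl pvStepRun (acc, cur) xs).2])
      = acc ++ runsR (cur ++ xs) := by
    intro xs
    induction xs with
    | nil =>
      intro cur acc hc hch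
      simp only [List.foldl_nil, List.append_nil]
      rw [if_neg (by simpa using hc), runsR_whole cur hch hc]
    | cons x xs ih =>
      intro cur acc hc hch
      simp only [List.foldl_cons]
      have hl : cur.getLast? = some (cur.getLast hc) := List.getLast?_eq_some_getLast hc
      by_cases hlx : cur.getLast hc > x
      · rw [show pvStepRun (acc, cur) x = (acc ++ [cur], [x]) by
          unfold pvStepRun
          rw [hl]
          simp [hlx]]
        rw [ih [x] (acc ++ [cur]) (by simp) (by simp)]
        have h2 : runsR (cur ++ x :: xs) = cur :: runsR ([x] ++ xs) :=
          runsR_split cur hc x xs hch hlx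
        rw [h2, List.append_assoc]
        rfl
      · rw [show pvStepRun (acc, cur) x = (acc, cur ++ [x]) by
          unfold pvStepRun
          rw [hl]
          simp [hlx]]
        have hch2 : List.IsChain (· ≤ ·) (cur ++ [x]) := by
          rw [List.isChain_append]
          refine ⟨hch, by simp, ?_⟩
          intro a ha y hy
          rw [hl] at ha
          simp at ha hy
          omega
        rw [ih (cur ++ [x]) acc (by simp) hch2, List.append_assoc]
        rfl
  rcases lst with _ | ⟨x, t⟩
  · rfl
  · unfold pvRuns
    simp only [List.foldl_cons]
    rw [show pvStepRun ([], []) x = ([], [x]) from rfl]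
    have := aux t [x] [] (by simp) (by simp)
    simpa using this

-- B's selection pass is the gStep fold
theorem foldl_best (rs : List (List Int)) : ∀ (b : List Int),
    List.foldl (fun b r =>
      let s := r.sum
      if r.length > b.1.length ∨ (r.length = b.1.length ∧ s > b.2) then (r, s) else b)
      (b, b.sum) rs
    = (List.foldl gStep b rs, (List.foldl gStep b rs).sum) := by
  induction rs with
  | nil => intro b; rfl
  | cons r rs ih =>
    intro b
    simp only [List.foldl_cons]
    by_cases h : b.length < r.length ∨ (b.length = r.length ∧ b.sum < r.sum)
    · rw [show (if r.length > b.length ∨ (r.length = b.length ∧ r.sum > b.sum)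
            then (r, r.sum) else (b, b.sum)) = (r, r.sum) from
          if_pos (by tauto), gStep_pos (b := b) h]
      exact ih r
    · rw [show (if r.length > b.length ∨ (r.length = b.length ∧ r.sum > b.sum)
            then (r, r.sum) else (b, b.sum)) = (b, b.sum) from
          if_neg (by tauto), gStep_neg (b := b) h]
      exact ih b

theorem portA_eq (lst : List Int) :
    longest_nondecreasing_subsequence lst = List.foldl gStep [] (runsR lst) := by
  unfold longest_nondecreasing_subsequence
  rw [PySem.List.pyRange_zero_natCast, List.foldl_map,
    show (((0 : Int), (none : Option Int), ([] : List Int))) = emb [] from rfl]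
  have key : ∀ (L : List Nat), (∀ i ∈ L, i < lst.length) → ∀ (b : List Int),
      List.foldl (fun s i' =>
        (PySem.List.pyRange ((i' : Nat) : Int) (lst.length : Int) 1).foldl (fun s j =>
          if (PySem.List.pyRange ((i' : Nat) : Int) j 1).all
               (fun k => decide (PySem.List.pyGetD lst k 0 ≤ PySem.List.pyGetD lst (k + 1) 0)) then
            let cl : Int := j - ((i' : Nat) : Int) + 1
            let cs : Int := (PySem.List.slice lst (some ((i' : Nat) : Int)) (some (j + 1))).sum
            if cl > s.1 ∨ (cl = s.1 ∧ pvGtOpt cs s.2.1 = true) then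
              (cl, some cs, PySem.List.slice lst (some ((i' : Nat) : Int)) (some (j + 1)))
            else s
          else s) s) (emb b) L
      = emb (List.foldl (fun b i' => gStep b (runPre (lst.drop i'))) b L) := by
    intro L
    induction L with
    | nil => intro _ b; rfl
    | cons j L ih =>
      intro hmem b
      simp only [List.foldl_cons]
      rw [innerA_eq lst j (hmem j (by simp)) b]
      exact ih (fun y hy => hmem y (by simp [hy])) _
  rw [key (List.range lst.length) (fun i hi => List.mem_range.mp hi) []]
  show List.foldl (fun b i' => gStep b (runPre (lst.drop i'))) [] (List.range lst.length)
    = List.foldl gStep [] (runsR lst)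
  rw [← List.foldl_map (f := fun i => lst.drop i) (g := fun b d => gStep b (runPre d)),
    mapDrop_eq_tailsNE, foldl_tails_eq_runs]

theorem portB_eq (lst : List Int) :
    longest_nondecreasing_subsequence_alt lst = List.foldl gStep [] (runsR lst) := by
  unfold longest_nondecreasing_subsequence_alt
  rw [pvRuns_eq_runsR,
    show (([] : List Int), (0 : Int)) = (([] : List Int), ([] : List Int).sum) from rfl,
    foldl_best (runsR lst) []]

-- ===== VERDICT (by name: the statement is the Claim_ definition above) =====
theorem longest_nondecreasing_subsequence_spec : Claim_equal_longest_nondecreasing_subsequence := by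
  intro lst _
  unfold Spec_longest_nondecreasing_subsequence
  rw [portA_eq, portB_eq]
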